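-- pv_equiv track=rewrite | github.com/AlexadnerLobanov/work | sorting.py | find_a_number
-- ===== SOURCE A (Python) =====
-- def find_a_number(dir):
--     number = ""
--     for i in str(dir)[::-1]:
--         if  i != "_":
--             try:
--                 number += str(int(i))
--             except:
--                 continue
--         else:
--             break
--     return int(number[::-1])
-- ===== SOURCE B (Python) =====
-- def _as_digit(c):
--     # mirror A's per-char try int(c): keep str(int(c)) when it succeeds, else drop
--     try:
--         return str(int(c))
--     except ValueError:
--         return ""
--
-- def find_a_number(dir):
--     tail = str(dir).rsplit('_', 1)[-1]
--     return int(''.join(_as_digit(c) for c in tail))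
-- ===== Notes on version B (the rewrite author's own statement) =====
-- stated objective: simpler
-- what changed: Replaces the reverse character scan with break/continue and string-reversal at the end by a forward pass: split at the last underscore, keep each char that int() accepts, and call int() once on the collected string.
-- outside the precondition, e.g. on find_a_number('abc_'): A raises ValueError, B raises ValueError; on find_a_number(''): A raises ValueError, B raises ValueError
import Mathlib
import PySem

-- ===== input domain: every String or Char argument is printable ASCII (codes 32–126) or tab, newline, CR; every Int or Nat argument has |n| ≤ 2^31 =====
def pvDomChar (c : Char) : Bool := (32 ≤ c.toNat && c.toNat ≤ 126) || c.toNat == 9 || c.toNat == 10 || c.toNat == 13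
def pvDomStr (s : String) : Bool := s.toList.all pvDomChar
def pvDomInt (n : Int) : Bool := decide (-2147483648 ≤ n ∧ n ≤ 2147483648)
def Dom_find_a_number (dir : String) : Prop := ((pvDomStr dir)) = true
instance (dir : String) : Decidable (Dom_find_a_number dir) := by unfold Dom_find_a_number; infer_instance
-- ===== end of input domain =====

-- B replaces A's reverse scan with break/continue and final string reversal by a
-- split-at-last-underscore then forward keep-int-accepted-chars pass; same cost, simpler shape.

-- ===== PORT A =====
-- the for-loop over str(dir)[::-1]: append str(int(i)) when int(i) succeeds,
-- skip on exception, break at '_'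
def findALoop : List Char → List Char → List Char
  | [], number => number
  | c :: rest, number =>
    if c ≠ '_' then
      match PySem.Int.ofChars? [c] with   -- int(i); exception → skip (continue)
      | some d => findALoop rest (number ++ PySem.Int.toChars d)
      | none => findALoop rest number
    else number                            -- break

def find_a_number (dir : String) : Int :=
  let number := findALoop dir.toList.reverse []
  (PySem.Int.ofChars? number.reverse).getD 0   -- int(number[::-1]); Pre_ excludes the ValueError case

-- ===== PORT B =====
-- _as_digit(c): str(int(c)) if int(c) succeeds, else ""
def asDigit (c : Char) : List Char :=
  match PySem.Int.ofChars? [c] with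
  | some d => PySem.Int.toChars d
  | none => []

def find_a_number_alt (dir : String) : Int :=
  -- str(dir).rsplit('_', 1)[-1]: segment after the LAST '_' (whole string if none)
  let tail := (dir.toList.reverse.takeWhile (fun c => c ≠ '_')).reverse
  (PySem.Int.ofChars? (tail.flatMap asDigit)).getD 0   -- int(joined); Pre_ excludes the ValueError case

-- ===== PRECONDITION & SPEC =====
-- Pre_ excludes exactly the inputs on which both A and B raise ValueError from int(''):
-- no character after the last underscore is accepted by int().
def Pre_find_a_number (dir : String) : Prop :=
  (dir.toList.reverse.takeWhile (fun c => c ≠ '_')).any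
    (fun c => (PySem.Int.ofChars? [c]).isSome) = true
instance (dir : String) : Decidable (Pre_find_a_number dir) := by unfold Pre_find_a_number; infer_instance
def pvWitness_find_a_number : String := "abc_12x3"
def Spec_find_a_number (dir : String) (out : Int) : Prop := out = find_a_number_alt dir
instance (dir : String) (out : Int) : Decidable (Spec_find_a_number dir out) := by unfold Spec_find_a_number; infer_instance

-- ===== CLAIM (what is proved, stated in full; the proofs are below) =====
def Claim_equal_find_a_number : Prop := ∀ (dir : String), Dom_find_a_number dir → Pre_find_a_number dir → Spec_find_a_number dir (find_a_number dir)

-- ===== LEMMAS AND PROOFS =====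

def pvIsDig (c : Char) : Bool := decide ('0' ≤ c) && decide (c ≤ '9')

lemma asDigit_ofNat : ∀ n, n < 127 →
    asDigit (Char.ofNat n) = (if pvIsDig (Char.ofNat n) then [Char.ofNat n] else []) := by decide

lemma charLt127_of_dom (c : Char) (h : pvDomChar c = true) : c.toNat < 127 := by
  simp only [pvDomChar, Bool.or_eq_true, Bool.and_eq_true, decide_eq_true_eq, beq_iff_eq] at h
  omega

lemma asDigit_dom (c : Char) (h : pvDomChar c = true) :
    asDigit c = (if pvIsDig c then [c] else []) := by
  have := asDigit_ofNat c.toNat (charLt127_of_dom c h)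
  simpa [Char.ofNat_toNat] using this

lemma findALoop_eq (l : List Char) (hl : ∀ c ∈ l, pvDomChar c = true) :
    ∀ number, findALoop l number = number ++ (l.takeWhile (fun c => c ≠ '_')).filter pvIsDig := by
  induction l with
  | nil => intro number; simp [findALoop]
  | cons c rest ih =>
    intro number
    by_cases hc : c = '_'
    · subst hc; simp [findALoop, List.takeWhile]
    · have hrest : ∀ x ∈ rest, pvDomChar x = true := fun x hx => hl x (List.mem_cons_of_mem _ hx)
      have hstep := asDigit_dom c (hl c (List.mem_cons_self))
      simp only [findALoop, if_pos (by simpa using hc)]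
      have : (match PySem.Int.ofChars? [c] with
              | some d => findALoop rest (number ++ PySem.Int.toChars d)
              | none => findALoop rest number) = findALoop rest (number ++ asDigit c) := by
        unfold asDigit
        cases PySem.Int.ofChars? [c] <;> simp
      rw [this, ih hrest]
      by_cases hd : pvIsDig c = true <;>
        simp [asDigit] at hstep <;>
        simp [hstep, hd, List.takeWhile, hc, List.append_assoc, asDigit]

lemma flatMap_asDigit_dom (l : List Char) (hl : ∀ c ∈ l, pvDomChar c = true) :
    l.flatMap asDigit = l.filter pvIsDig := by
  induction l with
  | nil => simp
  | cons c rest ih =>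
    have hrest : ∀ x ∈ rest, pvDomChar x = true := fun x hx => hl x (List.mem_cons_of_mem _ hx)
    have hstep := asDigit_dom c (hl c (List.mem_cons_self))
    by_cases hd : pvIsDig c = true <;> simp [hstep, hd, ih hrest, List.filter]

-- ===== VERDICT (by name: the statement is the Claim_ definition above) =====
theorem find_a_number_spec : Claim_equal_find_a_number := by
  intro dir hdom _hpre
  unfold Spec_find_a_number find_a_number find_a_number_alt
  have hl : ∀ c ∈ dir.toList.reverse, pvDomChar c = true := by
    intro c hc
    have : c ∈ dir.toList := List.mem_reverse.mp hc
    exact List.all_eq_true.mp hdom c this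
  have htail : ∀ c ∈ (dir.toList.reverse.takeWhile (fun c => c ≠ '_')).reverse, pvDomChar c = true := by
    intro c hc
    exact hl c (List.takeWhile_subset _ (List.mem_reverse.mp hc))
  simp only [findALoop_eq _ hl [], flatMap_asDigit_dom _ htail,
    List.nil_append, List.filter_reverse]
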